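-- pv_equiv track=rewrite | github.com/jscheule-609/AF-TimeAgent | state_machines/base.py | _path_label
-- ===== SOURCE A (Python) =====
-- def _path_label(path_states: list[str]) -> str:
--     """Generate a human-readable label for a path."""
--     if not path_states:
--         return "Empty path"
--     terminal = path_states[-1]
--     key_states = [s for s in path_states if s not in ("not_filed", "filed")]
--     if "second_request" in terminal or "second_request" in str(key_states):
--         return "Second Request Path"
--     if "phase_2" in terminal or "phase_2" in str(key_states):
--         return "Phase 2 Extended Review"
--     if "blocked" in terminal or "prohibited" in terminal:
--         return "Blocked / Prohibited"
--     if "withdrawn" in terminal or "abandoned" in terminal: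
--         return "Withdrawn / Abandoned"
--     if "clear" in terminal:
--         return "Clean Clearance"
--     return f"Path → {terminal}"
-- ===== SOURCE B (Python) =====
-- _LABELS = [
--     "Second Request Path",
--     "Phase 2 Extended Review",
--     "Blocked / Prohibited",
--     "Withdrawn / Abandoned",
--     "Clean Clearance",
-- ]
--
-- _INF = 6
--
--
-- def _state_score(s):
--     if "second_request" in s:
--         return 0
--     if "phase_2" in s:
--         return 1
--     return _INF
--
--
-- def _terminal_score(s):
--     if "blocked" in s or "prohibited" in s:
--         return 2
--     if "withdrawn" in s or "abandoned" in s: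
--         return 3
--     if "clear" in s:
--         return 4
--     return _INF
--
--
-- def _path_label(path_states: list[str]) -> str:
--     """Label a path by scoring: each state gets a numeric priority, min wins."""
--     if not path_states:
--         return "Empty path"
--     terminal = path_states[-1]
--     best = _terminal_score(terminal)
--     for s in path_states:
--         best = min(best, _state_score(s))
--     return _LABELS[best] if best < _INF else f"Path → {terminal}"
-- ===== Notes on version B (the rewrite author's own statement) =====
-- stated objective: alternative
-- what changed: Replaces the ordered first-match if/elif chain (with its 'kw in str(key_states)' repr scan) by a scoring formulation: every state is mapped to a numeric priority, the terminal gets its own score, the minimum score is folded over the path and looked up in a label table.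
import Mathlib
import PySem

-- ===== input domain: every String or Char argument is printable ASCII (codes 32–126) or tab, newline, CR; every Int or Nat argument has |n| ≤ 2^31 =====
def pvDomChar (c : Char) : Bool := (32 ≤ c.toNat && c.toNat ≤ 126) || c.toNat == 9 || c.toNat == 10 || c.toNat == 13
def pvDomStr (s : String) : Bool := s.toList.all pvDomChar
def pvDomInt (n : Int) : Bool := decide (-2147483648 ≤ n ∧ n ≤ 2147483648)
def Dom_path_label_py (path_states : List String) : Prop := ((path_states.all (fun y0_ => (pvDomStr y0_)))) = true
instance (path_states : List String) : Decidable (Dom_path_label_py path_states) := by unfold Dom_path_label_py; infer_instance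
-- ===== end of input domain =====

set_option maxRecDepth 4000


-- B replaces A's ordered first-match if/elif chain (and its "kw in str(key_states)" repr scan)
-- by a scoring formulation: each state is mapped to a numeric priority, the minimum score is
-- folded over the path and looked up in a label table ("alternative": same cost, different shape).

-- ===== PORT A =====
-- Python 'sub in s' on strings is PySem.Str.isIn (used by both ports).
-- str(list_of_str) is hand-ported below: CPython repr of a list of strings, exact on the
-- stated domain (printable ASCII plus tab/newline/CR — the only characters repr escapes
-- there are the backslash, the chosen quote, and tab/newline/CR).
def pyEsc (q c : Char) : List Char :=
  if c = '\\' then ['\\', '\\']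
  else if c = q then ['\\', q]
  else if c = '\t' then ['\\', 't']
  else if c = '\n' then ['\\', 'n']
  else if c = '\r' then ['\\', 'r']
  else [c]

-- CPython picks double quotes iff the string contains a single quote and no double quote.
def pyQuote (s : String) : Char :=
  if '\'' ∈ s.toList ∧ '"' ∉ s.toList then '"' else '\''

def pyReprStr (s : String) : List Char :=
  pyQuote s :: (s.toList.flatMap (pyEsc (pyQuote s)) ++ [pyQuote s])

def pyReprJoin : List String → List Char
  | [] => []
  | [s] => pyReprStr s
  | s :: rest => pyReprStr s ++ ',' :: ' ' :: pyReprJoin rest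

def pyStrList (l : List String) : String :=
  String.ofList ('[' :: (pyReprJoin l ++ [']']))

def path_label_py (path_states : List String) : String :=
  if path_states = [] then "Empty path"
  else
    let terminal := PySem.List.pyGetD path_states (-1) ""
    let key_states := path_states.filter (fun s => !(s == "not_filed" || s == "filed"))
    if PySem.Str.isIn "second_request" terminal || PySem.Str.isIn "second_request" (pyStrList key_states) then "Second Request Path"
    else if PySem.Str.isIn "phase_2" terminal || PySem.Str.isIn "phase_2" (pyStrList key_states) then "Phase 2 Extended Review"
    else if PySem.Str.isIn "blocked" terminal || PySem.Str.isIn "prohibited" terminal then "Blocked / Prohibited"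
    else if PySem.Str.isIn "withdrawn" terminal || PySem.Str.isIn "abandoned" terminal then "Withdrawn / Abandoned"
    else if PySem.Str.isIn "clear" terminal then "Clean Clearance"
    else "Path → " ++ terminal

-- ===== PORT B =====
def labelsB : List String :=
  [ "Second Request Path", "Phase 2 Extended Review", "Blocked / Prohibited",
    "Withdrawn / Abandoned", "Clean Clearance" ]

def stateScoreB (s : String) : Int :=
  if PySem.Str.isIn "second_request" s then 0
  else if PySem.Str.isIn "phase_2" s then 1
  else 6

def terminalScoreB (s : String) : Int :=
  if PySem.Str.isIn "blocked" s || PySem.Str.isIn "prohibited" s then 2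
  else if PySem.Str.isIn "withdrawn" s || PySem.Str.isIn "abandoned" s then 3
  else if PySem.Str.isIn "clear" s then 4
  else 6

def path_label_py_alt (path_states : List String) : String :=
  if path_states = [] then "Empty path"
  else
    let terminal := PySem.List.pyGetD path_states (-1) ""
    let best := path_states.foldl (fun b s => min b (stateScoreB s)) (terminalScoreB terminal)
    if best < 6 then PySem.List.pyGetD labelsB best "" else "Path → " ++ terminal

-- ===== PRECONDITION & SPEC =====
def Spec_path_label_py (path_states : List String) (out : String) : Prop := out = path_label_py_alt path_states
instance (path_states : List String) (out : String) : Decidable (Spec_path_label_py path_states out) := by unfold Spec_path_label_py; infer_instance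

-- ===== CLAIM (what is proved, stated in full; the proofs are below) =====
def Claim_equal_path_label_py : Prop := ∀ (path_states : List String), Dom_path_label_py path_states → Spec_path_label_py path_states (path_label_py path_states)

-- ===== LEMMAS AND PROOFS =====

-- A keyword suitable for scanning inside str(list): nonempty, made of characters that the
-- repr never escapes and that do not occur in repr's punctuation, and not starting with a
-- character that can be the second half of an escape pair.
def PlainKw (kw : List Char) : Prop :=
  kw ≠ [] ∧ (∀ c ∈ kw, c ∉ ['\\', '\'', '"', '\t', '\n', '\r', ',', ' ', '[', ']']) ∧
    kw.head? ≠ some 't' ∧ kw.head? ≠ some 'n' ∧ kw.head? ≠ some 'r'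

theorem prefix_split {α : Type} (kw x y : List α) (h : kw <+: x ++ y) :
    kw <+: x ∨ ∃ k2, kw = x ++ k2 ∧ k2 <+: y := by
  induction x generalizing kw with
  | nil => exact Or.inr ⟨kw, rfl, h⟩
  | cons c x ih =>
    cases kw with
    | nil => exact Or.inl List.nil_prefix
    | cons k kw =>
      rw [List.cons_append, List.cons_prefix_cons] at h
      obtain ⟨rfl, h⟩ := h
      rcases ih kw h with h' | ⟨k2, rfl, hk2⟩
      · exact Or.inl (List.cons_prefix_cons.mpr ⟨rfl, h'⟩)
      · exact Or.inr ⟨k2, rfl, hk2⟩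

theorem infix_split {α : Type} (kw x y : List α) (h : kw <:+: x ++ y) :
    kw <:+: x ∨ kw <:+: y ∨ ∃ k1 k2, kw = k1 ++ k2 ∧ k1 ≠ [] ∧ k1 <:+ x ∧ k2 <+: y := by
  induction x with
  | nil => exact Or.inr (Or.inl h)
  | cons c x ih =>
    rw [List.cons_append, List.infix_cons_iff] at h
    rcases h with h | h
    · rcases prefix_split kw (c :: x) y h with h' | ⟨k2, rfl, hk2⟩
      · exact Or.inl h'.isInfix
      · rcases eq_or_ne k2 [] with rfl | hne
        · exact Or.inl (by simp)
        · exact Or.inr (Or.inr ⟨c :: x, k2, rfl, by simp, List.suffix_refl _, hk2⟩)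
    · rcases ih h with h' | h' | ⟨k1, k2, rfl, hne, hs, hp⟩
      · exact Or.inl (List.infix_cons h')
      · exact Or.inr (Or.inl h')
      · exact Or.inr (Or.inr ⟨k1, k2, rfl, hne, hs.trans (List.suffix_cons c x), hp⟩)

theorem mem_of_suffix_concat {α : Type} (k1 x : List α) (q : α)
    (h : k1 <:+ x ++ [q]) (hne : k1 ≠ []) : q ∈ k1 := by
  obtain ⟨u, hu⟩ := h
  rcases List.eq_nil_or_concat k1 with rfl | ⟨k, a, rfl⟩
  · exact absurd rfl hne
  · have h2 : (u ++ k) ++ [a] = x ++ [q] := by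
      simpa [List.concat_eq_append, List.append_assoc] using hu
    have := (List.append_inj' h2 rfl).2
    simp_all

theorem drop_last_infix {α : Type} (kw X : List α) (c : α)
    (hc : c ∉ kw) (hne : kw ≠ []) (h : kw <:+: X ++ [c]) : kw <:+: X := by
  rcases infix_split kw X [c] h with h | h | ⟨k1, k2, rfl, hk1, hs, hp⟩
  · exact h
  · rcases List.sublist_singleton.mp h.sublist with rfl | rfl
    · exact absurd rfl hne
    · simp at hc
  · rcases List.sublist_singleton.mp hp.sublist with rfl | rfl
    · simpa using hs.isInfix
    · simp at hc

theorem pyEsc_plain (q c : Char) (hq : q = '\'' ∨ q = '"')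
    (hc : c ∉ ['\\', '\'', '"', '\t', '\n', '\r', ',', ' ', '[', ']']) :
    pyEsc q c = [c] := by
  simp only [List.mem_cons, List.not_mem_nil, or_false, not_or] at hc
  obtain ⟨h1, h2, h3, h4, h5, h6, _⟩ := hc
  rcases hq with rfl | rfl <;> simp [pyEsc, h1, h2, h3, h4, h5, h6]

theorem pyEsc_cases (q c : Char) :
    pyEsc q c = [c] ∨ ∃ x, pyEsc q c = ['\\', x] ∧
      (x = '\\' ∨ x = q ∨ x = 't' ∨ x = 'n' ∨ x = 'r') := by
  unfold pyEsc
  split_ifs <;> simp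

theorem flatMap_plain (q : Char) (hq : q = '\'' ∨ q = '"') (kw : List Char)
    (hpl : ∀ c ∈ kw, c ∉ ['\\', '\'', '"', '\t', '\n', '\r', ',', ' ', '[', ']']) :
    kw.flatMap (pyEsc q) = kw := by
  induction kw with
  | nil => rfl
  | cons c kw ih =>
    rw [List.flatMap_cons, pyEsc_plain q c hq (hpl c (by simp)),
      ih (fun c hc => hpl c (by simp [hc]))]
    rfl

theorem prefix_of_prefix_flatMap (q : Char) :
    ∀ (s kw : List Char),
      (∀ c ∈ kw, c ∉ ['\\', '\'', '"', '\t', '\n', '\r', ',', ' ', '[', ']']) →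
      kw <+: s.flatMap (pyEsc q) → kw <+: s := by
  intro s
  induction s with
  | nil =>
    intro kw _ h
    simpa using h
  | cons c s ih =>
    intro kw hpl h
    cases kw with
    | nil => exact List.nil_prefix
    | cons k kw =>
      rw [List.flatMap_cons] at h
      rcases pyEsc_cases q c with hc | ⟨x, hc, _⟩ <;> rw [hc] at h
      · rw [List.singleton_append, List.cons_prefix_cons] at h
        obtain ⟨rfl, h⟩ := h
        exact List.cons_prefix_cons.mpr ⟨rfl, ih kw (fun c hc => hpl c (by simp [hc])) h⟩
      · rw [List.cons_append, List.cons_prefix_cons] at h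
        have := hpl k (by simp)
        simp [h.1] at this

theorem infix_of_infix_flatMap (q : Char) (hq : q = '\'' ∨ q = '"') :
    ∀ (s kw : List Char),
      (∀ c ∈ kw, c ∉ ['\\', '\'', '"', '\t', '\n', '\r', ',', ' ', '[', ']']) →
      (kw.head? ≠ some 't' ∧ kw.head? ≠ some 'n' ∧ kw.head? ≠ some 'r') →
      kw <:+: s.flatMap (pyEsc q) → kw <:+: s := by
  intro s
  induction s with
  | nil =>
    intro kw _ _ h
    simpa using h
  | cons c s ih =>
    intro kw hpl hhd h
    rw [List.flatMap_cons] at h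
    rcases pyEsc_cases q c with hc | ⟨x, hc, hx⟩ <;> rw [hc] at h
    · rw [List.singleton_append, List.infix_cons_iff] at h
      rcases h with h | h
      · cases kw with
        | nil => exact List.nil_infix
        | cons k kw =>
          rw [List.cons_prefix_cons] at h
          obtain ⟨rfl, h⟩ := h
          exact (List.cons_prefix_cons.mpr
            ⟨rfl, prefix_of_prefix_flatMap q s kw (fun c hc => hpl c (by simp [hc])) h⟩).isInfix
      · exact List.infix_cons (ih kw hpl hhd h)
    · rw [List.cons_append, List.infix_cons_iff] at h
      rcases h with h | h
      · cases kw with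
        | nil => exact List.nil_infix
        | cons k kw =>
          rw [List.cons_prefix_cons] at h
          have := hpl k (by simp)
          simp [h.1] at this
      · rw [List.singleton_append, List.infix_cons_iff] at h
        rcases h with h | h
        · cases kw with
          | nil => exact List.nil_infix
          | cons k kw =>
            rw [List.cons_prefix_cons] at h
            obtain ⟨rfl, _⟩ := h
            have h1 := hpl k (by simp)
            obtain ⟨hd1, hd2, hd3⟩ := hhd
            rcases hq with rfl | rfl <;> rcases hx with rfl | rfl | rfl | rfl | rfl <;>
              simp_all
        · exact List.infix_cons (ih kw hpl hhd h)

theorem pyQuote_cases (s : String) : pyQuote s = '\'' ∨ pyQuote s = '"' := by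
  unfold pyQuote
  split_ifs <;> simp

theorem infix_reprStr_iff (kw : List Char) (hP : PlainKw kw) (s : String) :
    kw <:+: pyReprStr s ↔ kw <:+: s.toList := by
  obtain ⟨hne, hpl, hhd⟩ := hP
  have hq := pyQuote_cases s
  have hqmem : pyQuote s ∉ kw := by
    intro hmem
    have := hpl _ hmem
    rcases hq with h | h <;> simp [h] at this
  constructor
  · intro h
    unfold pyReprStr at h
    rw [List.infix_cons_iff] at h
    rcases h with h | h
    · cases kw with
      | nil => exact absurd rfl hne
      | cons k kw =>
        rw [List.cons_prefix_cons] at h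
        exact absurd (h.1 ▸ List.mem_cons_self) hqmem
    · exact infix_of_infix_flatMap (pyQuote s) hq s.toList kw hpl hhd
        (drop_last_infix _ _ _ hqmem hne h)
  · intro h
    obtain ⟨u, v, huv⟩ := h
    have hbody : s.toList.flatMap (pyEsc (pyQuote s)) =
        u.flatMap (pyEsc (pyQuote s)) ++ kw ++ v.flatMap (pyEsc (pyQuote s)) := by
      rw [← huv]
      simp [List.flatMap_append, flatMap_plain (pyQuote s) hq kw hpl]
    have h1 : kw <:+: s.toList.flatMap (pyEsc (pyQuote s)) := by
      rw [hbody]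
      exact ⟨u.flatMap (pyEsc (pyQuote s)), v.flatMap (pyEsc (pyQuote s)), rfl⟩
    unfold pyReprStr
    exact List.infix_cons (h1.trans (List.prefix_append _ _).isInfix)

theorem infix_reprJoin_iff (kw : List Char) (hP : PlainKw kw) :
    ∀ l : List String, (kw <:+: pyReprJoin l ↔ ∃ s ∈ l, kw <:+: s.toList) := by
  intro l
  induction l with
  | nil =>
    simp only [pyReprJoin, List.infix_nil]
    simp [hP.1]
  | cons s rest ih =>
    cases rest with
    | nil =>
      simp only [pyReprJoin]
      rw [infix_reprStr_iff kw hP s]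
      simp
    | cons r t =>
      obtain ⟨hne, hpl, hhd⟩ := hP
      show kw <:+: pyReprStr s ++ ',' :: ' ' :: pyReprJoin (r :: t) ↔ _
      constructor
      · intro h
        rcases infix_split kw (pyReprStr s) (',' :: ' ' :: pyReprJoin (r :: t)) h with
          h | h | ⟨k1, k2, rfl, hk1, hs, _⟩
        · exact ⟨s, by simp, (infix_reprStr_iff kw ⟨hne, hpl, hhd⟩ s).mp h⟩
        · rw [List.infix_cons_iff] at h
          rcases h with h | h
          · cases kw with
            | nil => exact absurd rfl hne
            | cons k kw =>
              rw [List.cons_prefix_cons] at h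
              have := hpl k (by simp)
              simp [h.1] at this
          · rw [List.infix_cons_iff] at h
            rcases h with h | h
            · cases kw with
              | nil => exact absurd rfl hne
              | cons k kw =>
                rw [List.cons_prefix_cons] at h
                have := hpl k (by simp)
                simp [h.1] at this
            · obtain ⟨s', hs', h'⟩ := ih.mp h
              exact ⟨s', by simp [hs'], h'⟩
        · have hqm : pyQuote s ∈ k1 := by
            apply mem_of_suffix_concat k1 (pyQuote s :: s.toList.flatMap (pyEsc (pyQuote s)))
              (pyQuote s) _ hk1
            simpa [pyReprStr, List.append_assoc] using hs
          have := hpl _ (List.mem_append.mpr (Or.inl hqm))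
          rcases pyQuote_cases s with h' | h' <;> simp [h'] at this
      · rintro ⟨s', hs', h⟩
        rcases List.mem_cons.mp hs' with rfl | hs'
        · exact ((infix_reprStr_iff kw ⟨hne, hpl, hhd⟩ s').mpr h).trans
            (List.prefix_append _ _).isInfix
        · have h1 : kw <:+: pyReprJoin (r :: t) := ih.mpr ⟨s', hs', h⟩
          refine h1.trans (List.IsSuffix.isInfix ?_)
          exact ((List.suffix_cons ' ' _).trans (List.suffix_cons ',' _)).trans
            (List.suffix_append _ _)

theorem infix_strList_iff (kw : List Char) (hP : PlainKw kw) (l : List String) :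
    kw <:+: (pyStrList l).toList ↔ ∃ s ∈ l, kw <:+: s.toList := by
  obtain ⟨hne, hpl, hhd⟩ := hP
  unfold pyStrList
  rw [String.toList_ofList]
  constructor
  · intro h
    rw [List.infix_cons_iff] at h
    rcases h with h | h
    · cases kw with
      | nil => exact absurd rfl hne
      | cons k kw =>
        rw [List.cons_prefix_cons] at h
        have := hpl k (by simp)
        simp [h.1] at this
    · have hrb : ']' ∉ kw := by
        intro hmem
        have := hpl _ hmem
        simp at this
      exact (infix_reprJoin_iff kw ⟨hne, hpl, hhd⟩ l).mp
        (drop_last_infix _ _ _ hrb hne h)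
  · intro h
    have h1 : kw <:+: pyReprJoin l := (infix_reprJoin_iff kw ⟨hne, hpl, hhd⟩ l).mpr h
    exact List.infix_cons (h1.trans (List.prefix_append _ _).isInfix)

-- The two ways of scanning agree: A checks the terminal and the repr of the filtered list,
-- B checks every state of the path directly.
theorem cond_eq (kw : String) (hP : PlainKw kw.toList)
    (hnf : ¬ kw.toList <:+: "not_filed".toList) (hf : ¬ kw.toList <:+: "filed".toList)
    (l : List String) (hl : l ≠ []) :
    (PySem.Str.isIn kw (PySem.List.pyGetD l (-1) "") ||
      PySem.Str.isIn kw (pyStrList (l.filter (fun s => !(s == "not_filed" || s == "filed"))))) =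
    l.any (fun s => PySem.Str.isIn kw s) := by
  rw [Bool.eq_iff_iff]
  simp only [Bool.or_eq_true, PySem.Str.isIn_iff_infix, List.any_eq_true,
    infix_strList_iff kw.toList hP, PySem.List.pyGetD_neg_one l "" hl]
  constructor
  · rintro (h | ⟨s, hs, h⟩)
    · exact ⟨l.getLast hl, List.getLast_mem hl, h⟩
    · exact ⟨s, (List.mem_filter.mp hs).1, h⟩
  · rintro ⟨s, hs, h⟩
    by_cases hcase : s = "not_filed" ∨ s = "filed"
    · rcases hcase with rfl | rfl
      · exact absurd h hnf
      · exact absurd h hf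
    · obtain ⟨h1, h2⟩ := not_or.mp hcase
      refine Or.inr ⟨s, List.mem_filter.mpr ⟨hs, ?_⟩, h⟩
      simp only [Bool.not_eq_eq_eq_not, Bool.not_true, Bool.or_eq_false_iff, beq_eq_false_iff_ne]
      exact ⟨h1, h2⟩

-- Characterisation of B's min-fold: its value is the initial score clipped by the best
-- (lowest) per-state score found anywhere in the list.
theorem fold_min_char (l : List String) (b0 : Int) (hb : b0 ≤ 6) :
    l.foldl (fun b s => min b (stateScoreB s)) b0 =
      min b0 (if l.any (fun s => PySem.Str.isIn "second_request" s) then 0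
        else if l.any (fun s => PySem.Str.isIn "phase_2" s) then 1 else 6) := by
  induction l generalizing b0 with
  | nil => simp; omega
  | cons c l ih =>
    rw [List.foldl_cons, ih (min b0 (stateScoreB c)) (le_trans (min_le_left _ _) hb)]
    simp only [List.any_cons]
    unfold stateScoreB
    by_cases hp : PySem.Str.isIn "second_request" c = true <;>
      by_cases hq : PySem.Str.isIn "phase_2" c = true <;>
        by_cases hP : (l.any fun s => PySem.Str.isIn "second_request" s) = true <;>
          by_cases hQ : (l.any fun s => PySem.Str.isIn "phase_2" s) = true <;>
            simp only [Bool.not_eq_true] at hp hq hP hQ <;>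
              simp only [hp, hq, hP, hQ, Bool.or_false,
                Bool.or_true, if_true, Bool.false_eq_true, if_false, min_def] <;>
                split_ifs <;> omega

-- ===== VERDICT (by name: the statement is the Claim_ definition above) =====
theorem path_label_py_spec : Claim_equal_path_label_py := by
  intro l _
  unfold Spec_path_label_py path_label_py path_label_py_alt
  by_cases hl : l = []
  · simp [hl]
  · simp only [if_neg hl]
    rw [fold_min_char _ _ (by unfold terminalScoreB; split_ifs <;> omega),
      ← cond_eq "second_request" (by unfold PlainKw; simp)
        (by rw [← PySem.Str.isIn_iff_infix]; decide) (by rw [← PySem.Str.isIn_iff_infix]; decide) l hl,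
      ← cond_eq "phase_2" (by unfold PlainKw; simp)
        (by rw [← PySem.Str.isIn_iff_infix]; decide) (by rw [← PySem.Str.isIn_iff_infix]; decide) l hl]
    unfold terminalScoreB
    split_ifs <;> simp_all <;> rfl
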